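-- pv_equiv track=rewrite | github.com/joshishruti9/Leetcode_Solutions | 1466-ReorderRoutestoMakeAllPathsLeadtotheCityZero/1466-ReorderRoutestoMakeAllPathsLeadtotheCityZero.py | reorder_count
-- ===== SOURCE A (Python) =====
-- from collections import deque
--
-- def reorder_count(adj_list):
--     visited = set()
--     queue = deque()
--     queue.append(0)
--     visited.add(0)
--     count = 0
--
--     while queue:
--         node = queue.popleft()
--         node_dict = adj_list.get(node, {})
--         for out in node_dict.get('out', []):
--             if out not in visited:
--                 count += 1
--                 queue.append(out)
--                 visited.add(out)
--
--         for innode in node_dict.get("in",[]):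
--             if innode not in visited:
--                 queue.append(innode)
--                 visited.add(innode)
--
--     return count
-- ===== SOURCE B (Python) =====
-- def reorder_count(adj_list):
--     # Three staged passes instead of A's counting BFS.
--     # Pass 1: plain BFS over the graph collecting only the discovery order.
--     order = [0]
--     visited = {0}
--     i = 0
--     while i < len(order):
--         d = adj_list.get(order[i], {})
--         for v in d.get('out', []) + d.get('in', []):
--             if v not in visited:
--                 visited.add(v)
--                 order.append(v)
--         i += 1
--     # Pass 2: label each mentioned node with the kind of list in which it is
--     # first mentioned, scanning nodes in processing order (out before in).
--     first = {}
--     for u in order: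
--         d = adj_list.get(u, {})
--         for w in d.get('out', []):
--             if w not in first:
--                 first[w] = True
--         for w in d.get('in', []):
--             if w not in first:
--                 first[w] = False
--     # Pass 3: a discovered node needs a reorder exactly when its first mention
--     # (which is the list its discoverer found it in) is an out-edge.
--     return sum(1 for v in order[1:] if first.get(v, False))
-- ===== Notes on version B (the rewrite author's own statement) =====
-- stated objective: alternative
-- what changed: Replaces A's single counting BFS by three staged passes: pass 1 is a plain BFS that only records the discovery order (no counting), pass 2 labels every mentioned node with the kind of list ('out' vs 'in') in which it is first mentioned along that order, and pass 3 counts the discovered nodes whose first mention is an out-edge; counting is thus fully detached from the traversal.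
import Mathlib
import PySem

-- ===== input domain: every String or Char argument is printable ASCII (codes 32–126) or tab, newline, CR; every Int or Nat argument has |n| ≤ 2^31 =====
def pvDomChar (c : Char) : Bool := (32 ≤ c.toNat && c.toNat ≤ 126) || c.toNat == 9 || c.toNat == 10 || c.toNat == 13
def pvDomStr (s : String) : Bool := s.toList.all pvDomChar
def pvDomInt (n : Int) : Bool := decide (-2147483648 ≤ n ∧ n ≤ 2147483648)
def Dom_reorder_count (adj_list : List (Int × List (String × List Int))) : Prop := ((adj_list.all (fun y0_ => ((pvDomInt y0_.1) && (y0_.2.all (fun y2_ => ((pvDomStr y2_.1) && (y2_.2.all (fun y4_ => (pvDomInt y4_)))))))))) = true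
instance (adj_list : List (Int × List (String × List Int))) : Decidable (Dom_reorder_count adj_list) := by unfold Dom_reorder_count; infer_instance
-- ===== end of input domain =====

-- B detaches the counting from the traversal: pass 1 is a plain BFS recording only
-- the discovery order, pass 2 counts each discovered node by scanning for its
-- discoverer and testing the 'out' list (objective: alternative decomposition);
-- return values proved equal on all inputs.

-- shared accessors: adj_list.get(node, {}).get('out'/'in', [])
def outL (adj : List (Int × List (String × List Int))) (u : Int) : List Int :=
  PySem.Dict.getD (PySem.Dict.mk (PySem.Dict.getD (PySem.Dict.mk adj) u [])) "out" []
def inL (adj : List (Int × List (String × List Int))) (u : Int) : List Int :=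
  PySem.Dict.getD (PySem.Dict.mk (PySem.Dict.getD (PySem.Dict.mk adj) u [])) "in" []

-- ===== PORT A =====
-- A-side helpers: the two inner for-loop bodies of A (state = (visited, appended queue part, count))
def aOutStep (st : PySem.Set Int × List Int × Int) (out : Int) : PySem.Set Int × List Int × Int :=
  if PySem.Set.contains st.1 out then st
  else (PySem.Set.add st.1 out, st.2.1 ++ [out], st.2.2 + 1)

def aInStep (st : PySem.Set Int × List Int × Int) (innode : Int) : PySem.Set Int × List Int × Int :=
  if PySem.Set.contains st.1 innode then st
  else (PySem.Set.add st.1 innode, st.2.1 ++ [innode], st.2.2)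

-- A's while-loop over the FIFO queue (popped front = head; appends go at the end).
-- fuel is a totality guard only: each iteration pops one element, total enqueues are
-- at most 1 (for node 0) + one per newly visited node ≤ 1 + Σ|neighbour lists|, so
-- the fuel below is provably never exhausted.
def aLoop (adj : List (Int × List (String × List Int))) :
    Nat → List Int → PySem.Set Int → Int → Int
  | 0, _, _, count => count
  | _ + 1, [], _, count => count
  | fuel + 1, node :: rest, visited, count =>
    let s1 := (outL adj node).foldl aOutStep (visited, [], count)
    let s2 := (inL adj node).foldl aInStep s1
    aLoop adj fuel (rest ++ s2.2.1) s2.1 s2.2.2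

def aFuel (adj : List (Int × List (String × List Int))) : Nat :=
  (adj.flatMap (fun p => p.2.flatMap (fun q => q.2))).length + 2

def reorder_count (adj_list : List (Int × List (String × List Int))) : Int :=
  aLoop adj_list (aFuel adj_list) [0] (PySem.Set.add PySem.Set.empty 0) 0

-- ===== PORT B =====
-- B-side helper: body of "for v in d.get('out',[]) + d.get('in',[])" (state = (visited, order))
def bStep (st : PySem.Set Int × List Int) (v : Int) : PySem.Set Int × List Int :=
  if PySem.Set.contains st.1 v then st
  else (PySem.Set.add st.1 v, st.2 ++ [v])

-- B's pass-1 while-loop: i scans the growing order list. fuel is a totality guard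
-- only: i increases by one per iteration and the final order has at most
-- 1 + Σ|neighbour lists| elements, so the fuel below is provably never exhausted.
def bPass1 (adj : List (Int × List (String × List Int))) :
    Nat → List Int → Nat → PySem.Set Int → List Int
  | 0, order, _, _ => order
  | fuel + 1, order, i, visited =>
    if i < order.length then
      let u := order.getD i 0          -- order[i], guarded by i < len(order)
      let s := (outL adj u ++ inL adj u).foldl bStep (visited, order)
      bPass1 adj fuel s.2 (i + 1) s.1
    else order

def bFuel (adj : List (Int × List (String × List Int))) : Nat :=
  (adj.flatMap (fun p => p.2.flatMap (fun q => q.2))).length + 2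

-- B's pass-2 body ("for u in order: ..."): record the kind of list in which a
-- node is first mentioned (True = 'out', False = 'in'), skipping known nodes
def bMark (adj : List (Int × List (String × List Int)))
    (first : PySem.Dict Int Bool) (u : Int) : PySem.Dict Int Bool :=
  let d1 := (outL adj u).foldl
    (fun first w => if PySem.Dict.contains first w then first
      else PySem.Dict.insert first w true) first
  (inL adj u).foldl
    (fun first w => if PySem.Dict.contains first w then first
      else PySem.Dict.insert first w false) d1

def reorder_count_alt (adj_list : List (Int × List (String × List Int))) : Int :=
  let order := bPass1 adj_list (bFuel adj_list) [0] 0 (PySem.Set.ofList [0])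
  let first := order.foldl (bMark adj_list) PySem.Dict.empty
  (order.drop 1).foldl
    (fun count v => count + (if PySem.Dict.getD first v false = true then 1 else 0)) 0

-- ===== PRECONDITION & SPEC =====
def Spec_reorder_count (adj_list : List (Int × List (String × List Int))) (out : Int) : Prop := out = reorder_count_alt adj_list
instance (adj_list : List (Int × List (String × List Int))) (out : Int) : Decidable (Spec_reorder_count adj_list out) := by unfold Spec_reorder_count; infer_instance

-- ===== CLAIM (what is proved, stated in full; the proofs are below) =====
def Claim_equal_reorder_count : Prop := ∀ (adj_list : List (Int × List (String × List Int))), Dom_reorder_count adj_list → Spec_reorder_count adj_list (reorder_count adj_list)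

-- ===== LEMMAS AND PROOFS =====

-- visited set and newly appended part of one bStep-fold, started with an empty append part
def pvVis (l : List Int) (v : PySem.Set Int) : PySem.Set Int := (l.foldl bStep (v, [])).1
def pvDelta (l : List Int) (v : PySem.Set Int) : List Int := (l.foldl bStep (v, [])).2

-- proof-side scan: value pass 2+3 assign to x, read off the processing order directly
def bScan (adj : List (Int × List (String × List Int))) (v : Int) : List Int → Int
  | [] => 0
  | u :: rest =>
    if (outL adj u).contains v then 1
    else if (inL adj u).contains v then 0
    else bScan adj v rest

-- first-mention tag of x along a list of nodes (out before in)
def bTag (adj : List (Int × List (String × List Int))) (x : Int) : List Int → Option Bool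
  | [] => none
  | u :: r =>
    if x ∈ outL adj u then some true
    else if x ∈ inL adj u then some false
    else bTag adj x r

theorem contains_add_of (s : PySem.Set Int) (x y : Int)
    (h : PySem.Set.contains s y = true) :
    PySem.Set.contains (PySem.Set.add s x) y = true := by
  rw [PySem.Set.contains_iff] at h ⊢
  exact (PySem.Set.mem_add s x y).2 (Or.inl h)

theorem contains_add_self (s : PySem.Set Int) (x : Int) :
    PySem.Set.contains (PySem.Set.add s x) x = true := by
  rw [PySem.Set.contains_iff]
  exact (PySem.Set.mem_add s x x).2 (Or.inr rfl)

theorem bStep_mem (v : PySem.Set Int) (q : List Int) (x : Int) (hm : x ∈ v) :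
    bStep (v, q) x = (v, q) := by
  simp [bStep, hm]

theorem bStep_not_mem (v : PySem.Set Int) (q : List Int) (x : Int) (hm : x ∉ v) :
    bStep (v, q) x = (PySem.Set.add v x, q ++ [x]) := by
  simp [bStep, hm]

theorem foldl_bStep_eq (l : List Int) (v : PySem.Set Int) (q : List Int) :
    l.foldl bStep (v, q) = (pvVis l v, q ++ pvDelta l v) := by
  induction l generalizing v q with
  | nil => simp [pvVis, pvDelta]
  | cons x xs ih =>
    by_cases hm : x ∈ v
    · rw [List.foldl_cons, bStep_mem v q x hm, ih]
      have e1 : pvVis (x :: xs) v = pvVis xs v := by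
        show (List.foldl bStep (bStep (v, []) x) xs).1 = _
        rw [bStep_mem v [] x hm]
        rfl
      have e2 : pvDelta (x :: xs) v = pvDelta xs v := by
        show (List.foldl bStep (bStep (v, []) x) xs).2 = _
        rw [bStep_mem v [] x hm]
        rfl
      rw [e1, e2]
    · rw [List.foldl_cons, bStep_not_mem v q x hm, ih]
      have e1 : pvVis (x :: xs) v = pvVis xs (PySem.Set.add v x) := by
        show (List.foldl bStep (bStep (v, []) x) xs).1 = _
        rw [bStep_not_mem v [] x hm, List.nil_append, ih]
      have e2 : pvDelta (x :: xs) v = x :: pvDelta xs (PySem.Set.add v x) := by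
        show (List.foldl bStep (bStep (v, []) x) xs).2 = _
        rw [bStep_not_mem v [] x hm, List.nil_append, ih]
        simp
      rw [e1, e2]
      simp

theorem pvVis_cons_mem (x : Int) (xs : List Int) (v : PySem.Set Int) (hm : x ∈ v) :
    pvVis (x :: xs) v = pvVis xs v := by
  show (List.foldl bStep (bStep (v, []) x) xs).1 = _
  rw [bStep_mem v [] x hm]
  rfl

theorem pvVis_cons_new (x : Int) (xs : List Int) (v : PySem.Set Int) (hm : x ∉ v) :
    pvVis (x :: xs) v = pvVis xs (PySem.Set.add v x) := by
  show (List.foldl bStep (bStep (v, []) x) xs).1 = _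
  rw [bStep_not_mem v [] x hm, List.nil_append, foldl_bStep_eq]

theorem pvDelta_cons_mem (x : Int) (xs : List Int) (v : PySem.Set Int) (hm : x ∈ v) :
    pvDelta (x :: xs) v = pvDelta xs v := by
  show (List.foldl bStep (bStep (v, []) x) xs).2 = _
  rw [bStep_mem v [] x hm]
  rfl

theorem pvDelta_cons_new (x : Int) (xs : List Int) (v : PySem.Set Int) (hm : x ∉ v) :
    pvDelta (x :: xs) v = x :: pvDelta xs (PySem.Set.add v x) := by
  show (List.foldl bStep (bStep (v, []) x) xs).2 = _
  rw [bStep_not_mem v [] x hm, List.nil_append, foldl_bStep_eq]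
  simp

theorem pvVis_mono (l : List Int) :
    ∀ (v : PySem.Set Int) (x : Int), PySem.Set.contains v x = true →
      PySem.Set.contains (pvVis l v) x = true := by
  induction l with
  | nil => intro v x h; simpa [pvVis] using h
  | cons a xs ih =>
    intro v x h
    by_cases hm : a ∈ v
    · rw [pvVis_cons_mem a xs v hm]; exact ih v x h
    · rw [pvVis_cons_new a xs v hm]
      exact ih _ x (contains_add_of v a x h)

theorem pvVis_all (l : List Int) :
    ∀ (v : PySem.Set Int) (x : Int), x ∈ l →
      PySem.Set.contains (pvVis l v) x = true := by
  induction l with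
  | nil => intro v x h; cases h
  | cons a xs ih =>
    intro v x h
    by_cases hm : a ∈ v
    · rw [pvVis_cons_mem a xs v hm]
      rcases List.mem_cons.1 h with rfl | hx
      · exact pvVis_mono xs v x ((PySem.Set.contains_iff v x).2 hm)
      · exact ih v x hx
    · rw [pvVis_cons_new a xs v hm]
      rcases List.mem_cons.1 h with rfl | hx
      · exact pvVis_mono xs _ x (contains_add_self v x)
      · exact ih _ x hx

theorem pvDelta_unvisited (l : List Int) :
    ∀ (v : PySem.Set Int) (x : Int), x ∈ pvDelta l v →
      PySem.Set.contains v x = false := by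
  induction l with
  | nil => intro v x h; simp [pvDelta] at h
  | cons a xs ih =>
    intro v x h
    by_cases hm : a ∈ v
    · rw [pvDelta_cons_mem a xs v hm] at h
      exact ih v x h
    · rw [pvDelta_cons_new a xs v hm] at h
      rcases List.mem_cons.1 h with rfl | hx
      · cases hc : PySem.Set.contains v x
        · rfl
        · exact absurd ((PySem.Set.contains_iff v x).1 hc) hm
      · have h2 := ih _ x hx
        cases hc : PySem.Set.contains v x
        · rfl
        · rw [contains_add_of v a x hc] at h2
          simp at h2

theorem pvDelta_sub (l : List Int) :
    ∀ (v : PySem.Set Int) (x : Int), x ∈ pvDelta l v → x ∈ l := by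
  induction l with
  | nil => intro v x h; simp [pvDelta] at h
  | cons a xs ih =>
    intro v x h
    by_cases hm : a ∈ v
    · rw [pvDelta_cons_mem a xs v hm] at h
      exact List.mem_cons_of_mem a (ih v x h)
    · rw [pvDelta_cons_new a xs v hm] at h
      rcases List.mem_cons.1 h with rfl | hx
      · exact List.mem_cons_self
      · exact List.mem_cons_of_mem a (ih _ x hx)

theorem pvVis_append (l m : List Int) (v : PySem.Set Int) :
    pvVis (l ++ m) v = pvVis m (pvVis l v) := by
  show ((l ++ m).foldl bStep (v, [])).1 = _
  rw [List.foldl_append, foldl_bStep_eq l v [], List.nil_append,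
    foldl_bStep_eq m (pvVis l v) (pvDelta l v)]

theorem pvDelta_append (l m : List Int) (v : PySem.Set Int) :
    pvDelta (l ++ m) v = pvDelta l v ++ pvDelta m (pvVis l v) := by
  show ((l ++ m).foldl bStep (v, [])).2 = _
  rw [List.foldl_append, foldl_bStep_eq l v [], List.nil_append,
    foldl_bStep_eq m (pvVis l v) (pvDelta l v)]

theorem aOutStep_mem (v : PySem.Set Int) (q : List Int) (c : Int) (x : Int) (hm : x ∈ v) :
    aOutStep (v, q, c) x = (v, q, c) := by
  simp [aOutStep, hm]

theorem aOutStep_not_mem (v : PySem.Set Int) (q : List Int) (c : Int) (x : Int) (hm : x ∉ v) :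
    aOutStep (v, q, c) x = (PySem.Set.add v x, q ++ [x], c + 1) := by
  simp [aOutStep, hm]

theorem aInStep_mem (v : PySem.Set Int) (q : List Int) (c : Int) (x : Int) (hm : x ∈ v) :
    aInStep (v, q, c) x = (v, q, c) := by
  simp [aInStep, hm]

theorem aInStep_not_mem (v : PySem.Set Int) (q : List Int) (c : Int) (x : Int) (hm : x ∉ v) :
    aInStep (v, q, c) x = (PySem.Set.add v x, q ++ [x], c) := by
  simp [aInStep, hm]

-- A's out-loop in terms of pvVis/pvDelta: count increase = number of appends
theorem aOut_eq (l : List Int) (v : PySem.Set Int) (q : List Int) (c : Int) :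
    l.foldl aOutStep (v, q, c)
      = (pvVis l v, q ++ pvDelta l v, c + ((pvDelta l v).length : Int)) := by
  induction l generalizing v q c with
  | nil => simp [pvVis, pvDelta]
  | cons x xs ih =>
    by_cases hm : x ∈ v
    · rw [List.foldl_cons, aOutStep_mem v q c x hm, ih, pvVis_cons_mem x xs v hm,
        pvDelta_cons_mem x xs v hm]
    · rw [List.foldl_cons, aOutStep_not_mem v q c x hm, ih, pvVis_cons_new x xs v hm,
        pvDelta_cons_new x xs v hm]
      rw [Prod.ext_iff]
      refine ⟨rfl, ?_⟩
      rw [Prod.ext_iff]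
      refine ⟨by simp, ?_⟩
      simp only [List.length_cons]
      push_cast
      ring

theorem aIn_eq (l : List Int) (v : PySem.Set Int) (q : List Int) (c : Int) :
    l.foldl aInStep (v, q, c) = (pvVis l v, q ++ pvDelta l v, c) := by
  induction l generalizing v q with
  | nil => simp [pvVis, pvDelta]
  | cons x xs ih =>
    by_cases hm : x ∈ v
    · rw [List.foldl_cons, aInStep_mem v q c x hm, ih, pvVis_cons_mem x xs v hm,
        pvDelta_cons_mem x xs v hm]
    · rw [List.foldl_cons, aInStep_not_mem v q c x hm, ih, pvVis_cons_new x xs v hm,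
        pvDelta_cons_new x xs v hm]
      simp

-- scan skips nodes whose lists do not mention x
theorem bScan_skip (adj : List (Int × List (String × List Int))) (x : Int) (pre rest : List Int)
    (h : ∀ u ∈ pre, x ∉ outL adj u ∧ x ∉ inL adj u) :
    bScan adj x (pre ++ rest) = bScan adj x rest := by
  induction pre with
  | nil => rfl
  | cons u pre' ih =>
    have h1 : (outL adj u).contains x = false := by simp [(h u (by simp)).1]
    have h2 : (inL adj u).contains x = false := by simp [(h u (by simp)).2]
    simp only [List.cons_append, bScan, h1, h2, Bool.false_eq_true, if_false]
    exact ih (fun u' hu' => h u' (List.mem_cons_of_mem u hu'))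

-- pass 1 only ever appends to order
theorem bPass1_prefix (adj : List (Int × List (String × List Int))) (fuel : Nat)
    (order : List Int) (i : Nat) (v : PySem.Set Int) :
    order <+: bPass1 adj fuel order i v := by
  induction fuel generalizing order i v with
  | zero => exact List.prefix_refl _
  | succ fuel ih =>
    simp only [bPass1]
    split
    · rw [foldl_bStep_eq]
      exact (List.prefix_append _ _).trans (ih _ _ _)
    · exact List.prefix_refl _

theorem sum_map_one_zero (f : Int → Int)
    (a b : List Int) (ha : ∀ x ∈ a, f x = 1) (hb : ∀ x ∈ b, f x = 0) :
    (((a ++ b).map f)).sum = (a.length : Int) := by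
  rw [List.map_append, List.sum_append, List.map_congr_left ha, List.map_congr_left hb]
  simp

-- the bridge: A's counting BFS from any aligned state = accumulated count plus the
-- pass-2 value of every node pass 1 will still discover
theorem bridge (adj : List (Int × List (String × List Int))) :
    ∀ (fuel : Nat) (order : List Int) (i : Nat) (v : PySem.Set Int) (c : Int),
    (∀ u' ∈ order.take i, ∀ y ∈ outL adj u' ++ inL adj u', PySem.Set.contains v y = true) →
    aLoop adj fuel (order.drop i) v c
      = c + (((bPass1 adj fuel order i v).drop order.length).map
          (fun x => bScan adj x (bPass1 adj fuel order i v))).sum := by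
  intro fuel
  induction fuel with
  | zero =>
    intro order i v c _
    simp [aLoop, bPass1]
  | succ fuel ih =>
    intro order i v c hInv
    by_cases hil : i < order.length
    · set u := order.getD i 0 with hu
      have hui : order[i] = u := by rw [hu]; exact (List.getD_eq_getElem order 0 hil).symm
      have hdrop : order.drop i = u :: order.drop (i + 1) := by
        rw [List.drop_eq_getElem_cons hil, hui]
      set dOut := pvDelta (outL adj u) v with hdO
      set vMid := pvVis (outL adj u) v with hvM
      set dIn := pvDelta (inL adj u) vMid with hdI
      set vAll := pvVis (inL adj u) vMid with hvA
      have hDall : pvDelta (outL adj u ++ inL adj u) v = dOut ++ dIn := pvDelta_append _ _ _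
      have hVall : pvVis (outL adj u ++ inL adj u) v = vAll := pvVis_append _ _ _
      have hB : bPass1 adj (fuel + 1) order i v
          = bPass1 adj fuel (order ++ (dOut ++ dIn)) (i + 1) vAll := by
        simp only [bPass1]
        rw [if_pos hil, ← hu, foldl_bStep_eq, hDall, hVall]
      have hA : aLoop adj (fuel + 1) (order.drop i) v c
          = aLoop adj fuel (order.drop (i + 1) ++ (dOut ++ dIn)) vAll
              (c + (dOut.length : Int)) := by
        rw [hdrop]
        simp only [aLoop]
        rw [aOut_eq, aIn_eq]
        simp only [List.nil_append, ← hdO, ← hvM, ← hdI, ← hvA]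
      obtain ⟨t, ht⟩ := bPass1_prefix adj fuel (order ++ (dOut ++ dIn)) (i + 1) vAll
      set O := bPass1 adj fuel (order ++ (dOut ++ dIn)) (i + 1) vAll with hO
      have htake : (order ++ (dOut ++ dIn)).take (i + 1) = order.take i ++ [u] := by
        rw [List.take_append_of_le_length (by omega), List.take_succ,
          List.getElem?_eq_getElem hil, hui]
        rfl
      have hInv' : ∀ u' ∈ (order ++ (dOut ++ dIn)).take (i + 1),
          ∀ y ∈ outL adj u' ++ inL adj u', PySem.Set.contains vAll y = true := by
        rw [htake]
        intro u' hu' y hy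
        rcases List.mem_append.1 hu' with h1 | h1
        · exact pvVis_mono _ _ _ (pvVis_mono _ _ _ (hInv u' h1 y hy))
        · have he : u' = u := by simpa using h1
          subst he
          rcases List.mem_append.1 hy with h2 | h2
          · exact pvVis_mono _ _ _ (pvVis_all _ _ _ h2)
          · exact pvVis_all _ _ _ h2
      have hIH := ih (order ++ (dOut ++ dIn)) (i + 1) vAll (c + (dOut.length : Int)) hInv'
      rw [List.drop_append_of_le_length (by omega)] at hIH
      rw [hA, hB, hIH]
      have hdropO1 : O.drop order.length = (dOut ++ dIn) ++ t := by
        rw [← ht, List.append_assoc, List.drop_left]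
      have hdropO2 : O.drop (order ++ (dOut ++ dIn)).length = t := by
        rw [← ht, List.drop_left]
      rw [hdropO1, hdropO2]
      have hOrepr : O = order.take i ++ u :: (order.drop (i + 1) ++ ((dOut ++ dIn) ++ t)) := by
        conv_lhs => rw [← ht]
        conv_lhs => rw [show order = order.take i ++ u :: order.drop (i + 1) from by
          rw [← hdrop, List.take_append_drop]]
        simp [List.append_assoc]
      have hpre : ∀ x ∈ dOut ++ dIn, ∀ u' ∈ order.take i,
          x ∉ outL adj u' ∧ x ∉ inL adj u' := by
        intro x hx u' hu'
        have hxv : PySem.Set.contains v x = false := by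
          apply pvDelta_unvisited (outL adj u ++ inL adj u) v
          rw [hDall]
          exact hx
        constructor
        · intro hmem
          have hco := hInv u' hu' x (List.mem_append.2 (Or.inl hmem))
          rw [hxv] at hco
          simp at hco
        · intro hmem
          have hco := hInv u' hu' x (List.mem_append.2 (Or.inr hmem))
          rw [hxv] at hco
          simp at hco
      have hvals1 : ∀ x ∈ dOut, bScan adj x O = 1 := by
        intro x hx
        rw [hOrepr, bScan_skip adj x _ _ (hpre x (List.mem_append.2 (Or.inl hx)))]
        have hxo : x ∈ outL adj u := pvDelta_sub _ _ _ hx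
        simp [bScan, hxo]
      have hvals0 : ∀ x ∈ dIn, bScan adj x O = 0 := by
        intro x hx
        rw [hOrepr, bScan_skip adj x _ _ (hpre x (List.mem_append.2 (Or.inr hx)))]
        have hxm : PySem.Set.contains vMid x = false := pvDelta_unvisited _ _ _ hx
        have hxo : x ∉ outL adj u := by
          intro hmem
          have hcon := pvVis_all (outL adj u) v x hmem
          rw [← hvM, hxm] at hcon
          simp at hcon
        have hxi : x ∈ inL adj u := pvDelta_sub _ _ _ hx
        simp [bScan, hxo, hxi]
      rw [List.map_append, List.sum_append,
        sum_map_one_zero _ dOut dIn hvals1 hvals0]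
      ring
    · have hd1 : order.drop i = [] := List.drop_eq_nil_of_le (by omega)
      have hb1 : bPass1 adj (fuel + 1) order i v = order := by
        simp [bPass1, hil]
      rw [hd1, hb1, List.drop_length]
      simp [aLoop]

theorem gfold_get? (b : Bool) (l : List Int) :
    ∀ (d : PySem.Dict Int Bool) (x : Int),
    PySem.Dict.get?
      (l.foldl (fun first w => if PySem.Dict.contains first w then first
        else PySem.Dict.insert first w b) d) x
      = if PySem.Dict.contains d x = true then PySem.Dict.get? d x
        else if x ∈ l then some b else none := by
  induction l with
  | nil =>
    intro d x
    by_cases h : PySem.Dict.contains d x = true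
    · simp [h]
    · have h' : PySem.Dict.contains d x = false := by simpa using h
      have hn : PySem.Dict.get? d x = none := by
        have := PySem.Dict.contains_eq_isSome_get? d x
        rw [h'] at this
        cases hg : PySem.Dict.get? d x
        · rfl
        · rw [hg] at this; simp at this
      simp [h', hn]
  | cons w ws ih =>
    intro d x
    simp only [List.foldl_cons]
    by_cases hw : PySem.Dict.contains d w = true
    · rw [if_pos hw, ih d x]
      by_cases hx : PySem.Dict.contains d x = true
      · simp [hx]
      · have hxw : x ≠ w := fun he => hx (he ▸ hw)
        simp [hx, hxw]
    · have hw' : PySem.Dict.contains d w = false := by simpa using hw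
      rw [if_neg (by simp [hw']), ih]
      by_cases hxw : x = w
      · subst hxw
        have hc : PySem.Dict.contains (PySem.Dict.insert d x b) x = true := by
          rw [PySem.Dict.contains_insert]
          simp
        rw [if_pos hc, PySem.Dict.get?_insert_self]
        simp [hw']
      · have hc : PySem.Dict.contains (PySem.Dict.insert d w b) x = PySem.Dict.contains d x := by
          rw [PySem.Dict.contains_insert]
          simp [hxw]
        have hg : PySem.Dict.get? (PySem.Dict.insert d w b) x = PySem.Dict.get? d x :=
          PySem.Dict.get?_insert_of_ne _ _ hxw
        rw [hc, hg]
        by_cases hx : PySem.Dict.contains d x = true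
        · simp [hx]
        · simp [hx, hxw]

theorem bMark_get? (adj : List (Int × List (String × List Int))) (d : PySem.Dict Int Bool)
    (u : Int) (x : Int) :
    PySem.Dict.get? (bMark adj d u) x
      = if PySem.Dict.contains d x = true then PySem.Dict.get? d x
        else if x ∈ outL adj u then some true
        else if x ∈ inL adj u then some false
        else none := by
  show PySem.Dict.get? ((inL adj u).foldl _ ((outL adj u).foldl _ d)) x = _
  rw [gfold_get? false, gfold_get? true]
  by_cases hdx : PySem.Dict.contains d x = true
  · have hs : (PySem.Dict.get? d x).isSome = true := by
      rw [← PySem.Dict.contains_eq_isSome_get?]; exact hdx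
    have hc : PySem.Dict.contains ((outL adj u).foldl
        (fun first w => if PySem.Dict.contains first w then first
          else PySem.Dict.insert first w true) d) x = true := by
      rw [PySem.Dict.contains_eq_isSome_get?, gfold_get? true, if_pos hdx]
      exact hs
    rw [if_pos hc, if_pos hdx, if_pos hdx]
  · have hdx' : PySem.Dict.contains d x = false := by simpa using hdx
    by_cases hxo : x ∈ outL adj u
    · have hc : PySem.Dict.contains ((outL adj u).foldl
          (fun first w => if PySem.Dict.contains first w then first
            else PySem.Dict.insert first w true) d) x = true := by
        rw [PySem.Dict.contains_eq_isSome_get?, gfold_get? true,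
          if_neg (by simp [hdx']), if_pos hxo]
        rfl
      rw [if_pos hc, if_neg (by simp [hdx']), if_pos hxo, if_neg (by simp [hdx']), if_pos hxo]
    · have hc : PySem.Dict.contains ((outL adj u).foldl
          (fun first w => if PySem.Dict.contains first w then first
            else PySem.Dict.insert first w true) d) x = false := by
        rw [PySem.Dict.contains_eq_isSome_get?, gfold_get? true,
          if_neg (by simp [hdx']), if_neg hxo]
        rfl
      by_cases hxi : x ∈ inL adj u
      · simp [hc, hdx', hxo, hxi]
      · simp [hc, hdx', hxo, hxi]

theorem mark_fold_get? (adj : List (Int × List (String × List Int))) (os : List Int) :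
    ∀ (d : PySem.Dict Int Bool) (x : Int),
    PySem.Dict.get? (os.foldl (bMark adj) d) x
      = if PySem.Dict.contains d x = true then PySem.Dict.get? d x
        else bTag adj x os := by
  induction os with
  | nil =>
    intro d x
    by_cases h : PySem.Dict.contains d x = true
    · simp [h]
    · have h' : PySem.Dict.contains d x = false := by simpa using h
      have hn : PySem.Dict.get? d x = none := by
        have := PySem.Dict.contains_eq_isSome_get? d x
        rw [h'] at this
        cases hg : PySem.Dict.get? d x
        · rfl
        · rw [hg] at this; simp at this
      simp [h', hn, bTag]
  | cons u os' ih =>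
    intro d x
    simp only [List.foldl_cons]
    rw [ih (bMark adj d u) x]
    have hcm : PySem.Dict.contains (bMark adj d u) x
        = (PySem.Dict.get? (bMark adj d u) x).isSome :=
      PySem.Dict.contains_eq_isSome_get? _ _
    by_cases hdx : PySem.Dict.contains d x = true
    · have hs : (PySem.Dict.get? d x).isSome = true := by
        rw [← PySem.Dict.contains_eq_isSome_get?]; exact hdx
      have hc : PySem.Dict.contains (bMark adj d u) x = true := by
        rw [hcm, bMark_get?, if_pos hdx]; exact hs
      rw [if_pos hc, bMark_get?, if_pos hdx, if_pos hdx]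
    · have hdx' : PySem.Dict.contains d x = false := by simpa using hdx
      by_cases hxo : x ∈ outL adj u
      · have hc : PySem.Dict.contains (bMark adj d u) x = true := by
          rw [hcm, bMark_get?, if_neg (by simp [hdx']), if_pos hxo]; rfl
        rw [if_pos hc, bMark_get?, if_neg (by simp [hdx']), if_pos hxo,
          if_neg (by simp [hdx'])]
        simp [bTag, hxo]
      · by_cases hxi : x ∈ inL adj u
        · have hc : PySem.Dict.contains (bMark adj d u) x = true := by
            rw [hcm, bMark_get?, if_neg (by simp [hdx']), if_neg hxo, if_pos hxi]; rfl
          rw [if_pos hc, bMark_get?, if_neg (by simp [hdx']), if_neg hxo, if_pos hxi,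
            if_neg (by simp [hdx'])]
          simp [bTag, hxo, hxi]
        · have hc : PySem.Dict.contains (bMark adj d u) x = false := by
            rw [hcm, bMark_get?, if_neg (by simp [hdx']), if_neg hxo, if_neg hxi]; rfl
          rw [if_neg (by simp [hc]), if_neg (by simp [hdx'])]
          simp [bTag, hxo, hxi]

theorem bTag_scan (adj : List (Int × List (String × List Int))) (x : Int) :
    ∀ (os : List Int),
    (if (bTag adj x os).getD false = true then (1 : Int) else 0) = bScan adj x os := by
  intro os
  induction os with
  | nil => simp [bTag, bScan]
  | cons u r ih =>
    by_cases hxo : x ∈ outL adj u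
    · simp [bTag, bScan, hxo]
    · by_cases hxi : x ∈ inL adj u
      · simp [bTag, bScan, hxo, hxi]
      · have e1 : bTag adj x (u :: r) = bTag adj x r := by simp [bTag, hxo, hxi]
        have e2 : bScan adj x (u :: r) = bScan adj x r := by simp [bScan, hxo, hxi]
        rw [e1, e2]
        exact ih

-- pass 2+3 assign x exactly the scan value
theorem scan_eq_mark (adj : List (Int × List (String × List Int))) (os : List Int) (x : Int) :
    (if PySem.Dict.getD (os.foldl (bMark adj) PySem.Dict.empty) x false = true
      then (1 : Int) else 0) = bScan adj x os := by
  rw [PySem.Dict.getD_eq_get?_getD, mark_fold_get? adj os PySem.Dict.empty x]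
  simp only [PySem.Dict.contains_empty, Bool.false_eq_true, if_false]
  exact bTag_scan adj x os

-- ===== VERDICT (by name: the statement is the Claim_ definition above) =====
theorem reorder_count_spec : Claim_equal_reorder_count := by
  intro adj _
  unfold Spec_reorder_count reorder_count reorder_count_alt
  have h0 : PySem.Set.ofList ([0] : List Int) = PySem.Set.add PySem.Set.empty 0 := rfl
  have hf : bFuel adj = aFuel adj := rfl
  rw [hf, h0, PySem.List.foldl_add]
  rw [List.map_congr_left (fun x _ => scan_eq_mark adj
    (bPass1 adj (aFuel adj) [0] 0 (PySem.Set.add PySem.Set.empty 0)) x)]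
  have hb := bridge adj (aFuel adj) [0] 0 (PySem.Set.add PySem.Set.empty 0) 0
    (by intro u' hu'; simp at hu')
  simpa using hb
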